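-- pv_equiv track=rewrite | github.com/alexandertwaters/getIQOQPQ | engine/render_engine.py | _build_iq_test_scripts_table
-- ===== SOURCE A (Python) =====
-- def _build_iq_test_scripts_table(checklist_items):
--     """Build representative IQ test script rows (Category | Objective | Setup | Steps | Data to record | Acceptance) from checklist items."""
--     if not checklist_items:
--         return []
--     by_cat = {}
--     for it in checklist_items:
--         cat = it.get("category", "Other")
--         if cat not in by_cat:
--             by_cat[cat] = []
--         by_cat[cat].append(it)
--     rows = []
--     for cat, items in sorted(by_cat.items()):
--         first = items[0]
--         desc = first.get("description", "")
--         expected = first.get("expected", "")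
--         objective = f"Verify {desc}" if desc else "Verify installation per specification."
--         setup = "Equipment installed; drawings and supplier documentation available; tools and calibrated instruments per procedure."
--         steps = "1. Review specification and drawings. 2. Verify item per expected criteria. 3. Record results and evidence."
--         if len(items) > 1:
--             steps = "1. Review specification and drawings. 2. Verify each item in this category per expected criteria. 3. Record results and evidence."
--         data = "Checklist result (Pass/Fail), measured values if applicable, evidence file reference."
--         acceptance = expected if expected else "Conforms to supplier specification and site requirements."
--         rows.append({
--             "category": cat,
--             "objective": objective,
--             "setup": setup,
--             "steps": steps,
--             "dataToRecord": data,
--             "acceptanceCriteria": acceptance,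
--         })
--     return rows
-- ===== SOURCE B (Python) =====
-- def _build_iq_test_scripts_table(checklist_items):
--     """Build representative IQ test script rows (Category | Objective | Setup | Steps | Data to record | Acceptance) from checklist items."""
--     key = lambda it: it.get("category", "Other")
--
--     def row(cat):
--         # one pass: first item of the category and how many there are (no group list)
--         first, count = None, 0
--         for it in checklist_items:
--             if key(it) == cat:
--                 count += 1
--                 if first is None:
--                     first = it
--         desc = first.get("description", "")
--         expected = first.get("expected", "")
--         return {
--             "category": cat,
--             "objective": "Verify " + desc if desc else "Verify installation per specification.",
--             "setup": "Equipment installed; drawings and supplier documentation available; tools and calibrated instruments per procedure.",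
--             "steps": ("1. Review specification and drawings. 2. Verify each item in this category per expected criteria. 3. Record results and evidence."
--                       if count > 1 else
--                       "1. Review specification and drawings. 2. Verify item per expected criteria. 3. Record results and evidence."),
--             "dataToRecord": "Checklist result (Pass/Fail), measured values if applicable, evidence file reference.",
--             "acceptanceCriteria": expected if expected else "Conforms to supplier specification and site requirements.",
--         }
--
--     return [row(cat) for cat in sorted({key(it) for it in checklist_items})]
-- ===== Notes on version B (the rewrite author's own statement) =====
-- stated objective: idiomatic
-- what changed: Builds no grouping dictionary and no per-category lists: B scans sorted(set(categories)) and, per category, computes just the first matching item and a count in one accumulator pass, building each row directly.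
import Mathlib
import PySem

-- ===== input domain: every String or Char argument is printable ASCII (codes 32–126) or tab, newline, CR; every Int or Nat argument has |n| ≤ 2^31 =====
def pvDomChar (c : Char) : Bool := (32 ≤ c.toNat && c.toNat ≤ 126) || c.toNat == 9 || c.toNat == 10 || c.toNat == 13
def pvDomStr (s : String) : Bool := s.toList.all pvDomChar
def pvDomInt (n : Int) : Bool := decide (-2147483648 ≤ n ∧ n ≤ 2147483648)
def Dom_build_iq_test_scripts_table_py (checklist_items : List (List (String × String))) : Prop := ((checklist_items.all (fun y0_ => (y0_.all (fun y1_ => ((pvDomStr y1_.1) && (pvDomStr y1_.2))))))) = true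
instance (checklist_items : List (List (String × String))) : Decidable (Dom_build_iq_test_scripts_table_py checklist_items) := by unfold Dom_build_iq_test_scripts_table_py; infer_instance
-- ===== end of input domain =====

-- B builds no grouping dict and no per-category group lists: it scans the sorted distinct
-- categories and, per category, computes only (first matching item, count) in one
-- accumulator pass (idiomatic decomposition; same results).

-- shared string literals of the Python source (pure literals, used by both ports)
def pvObjDefault : String := "Verify installation per specification."
def pvSetup : String := "Equipment installed; drawings and supplier documentation available; tools and calibrated instruments per procedure."
def pvStepsOne : String := "1. Review specification and drawings. 2. Verify item per expected criteria. 3. Record results and evidence."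
def pvStepsMany : String := "1. Review specification and drawings. 2. Verify each item in this category per expected criteria. 3. Record results and evidence."
def pvData : String := "Checklist result (Pass/Fail), measured values if applicable, evidence file reference."
def pvAccDefault : String := "Conforms to supplier specification and site requirements."

-- it.get("category", "Other") (an item is a dict str→str, modelled as an assoc list)
def pvCat (it : List (String × String)) : String := (PySem.Dict.mk it).getD "category" "Other"

-- ===== PORT A =====
-- the body of A's second loop: one row built from a category and its grouped items
def pvRowA (cat : String) (items : List (List (String × String))) : List (String × String) :=
  -- items[0]: every group A builds is nonempty, so pyGet? is some; .getD [] totalizes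
  let first := (PySem.List.pyGet? items 0).getD []
  let desc := (PySem.Dict.mk first).getD "description" ""
  let expected := (PySem.Dict.mk first).getD "expected" ""
  let objective := if desc ≠ "" then "Verify " ++ desc else pvObjDefault
  let steps := if items.length > 1 then pvStepsMany else pvStepsOne
  let acceptance := if expected ≠ "" then expected else pvAccDefault
  [("category", cat), ("objective", objective), ("setup", pvSetup),
   ("steps", steps), ("dataToRecord", pvData), ("acceptanceCriteria", acceptance)]

def build_iq_test_scripts_table_py (checklist_items : List (List (String × String))) : List (List (String × String)) :=
  if checklist_items = [] then []
  else
    -- for it: cat = it.get(...); if cat not in by_cat: by_cat[cat] = []; by_cat[cat].append(it)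
    let by_cat : PySem.Dict String (List (List (String × String))) :=
      checklist_items.foldl (fun d it =>
        let cat := pvCat it
        let d := if d.contains cat then d else d.insert cat []
        -- by_cat[cat].append(it): cat is present here, so modify with default [] is exact
        d.modify cat [] (· ++ [it])) PySem.Dict.empty
    -- sorted(by_cat.items()): dict keys are unique, so Python's tuple sort orders by the
    -- category string alone and never compares the value lists
    (PySem.List.sorted by_cat.items (fun p => p.1) false).foldl
      (fun rows p => rows ++ [pvRowA p.1 p.2]) []

-- ===== PORT B =====
-- the inner 'for it in checklist_items' pass of B's row(cat): (first or None, count)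
def pvFirstCount (checklist_items : List (List (String × String))) (cat : String) :
    Option (List (String × String)) × Nat :=
  checklist_items.foldl
    (fun st it =>
      if pvCat it == cat then
        ((match st.1 with | none => some it | some f => some f), st.2 + 1)
      else st)
    (none, 0)

def build_iq_test_scripts_table_py_alt (checklist_items : List (List (String × String))) : List (List (String × String)) :=
  (PySem.List.sorted (PySem.Set.ofList (checklist_items.map pvCat)) (fun c => c) false).map
    (fun cat =>
      match pvFirstCount checklist_items cat with
      | (first?, count) =>
        -- first is never None here (cat comes from the set of categories); getD [] totalizes
        let g := fun k => (PySem.Dict.mk (first?.getD [])).getD k ""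
        [("category", cat),
         ("objective", if g "description" ≠ "" then "Verify " ++ g "description" else pvObjDefault),
         ("setup", pvSetup),
         ("steps", if count > 1 then pvStepsMany else pvStepsOne),
         ("dataToRecord", pvData),
         ("acceptanceCriteria", if g "expected" ≠ "" then g "expected" else pvAccDefault)])

-- ===== PRECONDITION & SPEC =====
def Spec_build_iq_test_scripts_table_py (checklist_items : List (List (String × String))) (out : List (List (String × String))) : Prop := out = build_iq_test_scripts_table_py_alt checklist_items
instance (checklist_items : List (List (String × String))) (out : List (List (String × String))) : Decidable (Spec_build_iq_test_scripts_table_py checklist_items out) := by unfold Spec_build_iq_test_scripts_table_py; infer_instance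

-- ===== CLAIM (what is proved, stated in full; the proofs are below) =====
def Claim_equal_build_iq_test_scripts_table_py : Prop := ∀ (checklist_items : List (List (String × String))), Dom_build_iq_test_scripts_table_py checklist_items → Spec_build_iq_test_scripts_table_py checklist_items (build_iq_test_scripts_table_py checklist_items)

-- ===== LEMMAS AND PROOFS =====

theorem pv_flatMap_singleton {α β : Type} (f : α → β) (l : List α) :
    l.flatMap (fun x => [f x]) = l.map f := by
  induction l with
  | nil => rfl
  | cons x t ih => simp [List.flatMap_cons, ih]

-- A's grouping step (insert-if-absent, then append) is one dict.modify with default []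
theorem pv_step_eq (d : PySem.Dict String (List (List (String × String))))
    (it : List (String × String)) :
    (let cat := pvCat it;
     (if d.contains cat then d else d.insert cat []).modify cat [] (· ++ [it]))
      = d.modify (pvCat it) [] (· ++ [it]) := by
  by_cases h : d.contains (pvCat it) = true
  · simp [h]
  · have h' : d.contains (pvCat it) = false := by simpa using h
    simp only [h', if_false, Bool.false_eq_true]
    simp only [PySem.Dict.modify, PySem.Dict.insert_insert_self]
    rw [PySem.Dict.getD_of_not_contains (h := h'), PySem.Dict.getD_insert_self]

-- B's accumulator pass computes the head and length of A's group (the filter)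
theorem pv_firstCount_go (cat : String) (xs : List (List (String × String)))
    (acc : Option (List (String × String)) × Nat) :
    xs.foldl
      (fun st it =>
        if pvCat it == cat then
          ((match st.1 with | none => some it | some f => some f), st.2 + 1)
        else st) acc
    = (acc.1.or (xs.filter (fun it => pvCat it == cat)).head?,
       acc.2 + (xs.filter (fun it => pvCat it == cat)).length) := by
  induction xs generalizing acc with
  | nil => simp
  | cons x t ih =>
    obtain ⟨f?, n⟩ := acc
    by_cases hx : (pvCat x == cat) = true
    · rw [List.foldl_cons, if_pos hx, ih]
      cases f? <;> simp [hx, Nat.add_assoc, Nat.add_comm 1]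
    · rw [List.foldl_cons, if_neg hx, ih]
      simp [Bool.eq_false_iff.mpr hx]

theorem pv_firstCount_spec (xs : List (List (String × String))) (cat : String) :
    pvFirstCount xs cat
      = ((xs.filter (fun it => pvCat it == cat)).head?,
         (xs.filter (fun it => pvCat it == cat)).length) := by
  rw [pvFirstCount, pv_firstCount_go]; simp

-- on a nonempty group, A's row from the group equals B's row from (first, count)
theorem pv_row_eq (xs : List (List (String × String))) (cat : String)
    (hne : xs.filter (fun it => pvCat it == cat) ≠ []) :
    pvRowA cat (xs.filter (fun it => pvCat it == cat))
      = (match pvFirstCount xs cat with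
         | (first?, count) =>
           let g := fun k => (PySem.Dict.mk (first?.getD [])).getD k ""
           [("category", cat),
            ("objective", if g "description" ≠ "" then "Verify " ++ g "description" else pvObjDefault),
            ("setup", pvSetup),
            ("steps", if count > 1 then pvStepsMany else pvStepsOne),
            ("dataToRecord", pvData),
            ("acceptanceCriteria", if g "expected" ≠ "" then g "expected" else pvAccDefault)]) := by
  rw [pv_firstCount_spec]
  obtain ⟨f, t, hft⟩ := List.exists_cons_of_ne_nil hne
  rw [hft]
  simp [pvRowA, PySem.List.pyGet?, PySem.List.pyIdx?]

theorem pv_main (xs : List (List (String × String))) :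
    build_iq_test_scripts_table_py xs = build_iq_test_scripts_table_py_alt xs := by
  by_cases hnil : xs = []
  · subst hnil; rfl
  · unfold build_iq_test_scripts_table_py build_iq_test_scripts_table_py_alt
    rw [if_neg hnil]
    have hfold :
        xs.foldl (fun d it =>
            let cat := pvCat it;
            (if d.contains cat then d else d.insert cat []).modify cat [] (· ++ [it]))
          PySem.Dict.empty
        = xs.foldl (fun d it => d.modify (pvCat it) [] (· ++ [it])) PySem.Dict.empty := by
      congr 1
      funext d it
      exact pv_step_eq d it
    rw [hfold]
    set d : PySem.Dict String (List (List (String × String))) :=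
      xs.foldl (fun d it => d.modify (pvCat it) [] (· ++ [it])) PySem.Dict.empty with hd
    have hkeys : d.keys = PySem.Set.ofList (xs.map pvCat) := by
      rw [hd, PySem.Dict.keys_foldl_modify_key xs pvCat [] (fun _ it v => v ++ [it]),
        PySem.Dict.keys_empty, PySem.Set.update_nil_left]
    have hnodup : d.keys.Nodup := by
      rw [hd]
      exact PySem.Dict.nodup_keys_foldl_modify_key xs pvCat [] (fun _ it v => v ++ [it]) _
        (by simp [PySem.Dict.keys_empty])
    have hgetD : ∀ c, d.getD c [] = xs.filter (fun it => pvCat it == c) := by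
      intro c
      have hm := List.foldl_map (f := fun (it : List (String × String)) => (pvCat it, it))
        (g := fun (d : PySem.Dict String (List (List (String × String)))) p =>
          d.modify p.1 [] (· ++ [p.2])) (l := xs) (init := PySem.Dict.empty)
      rw [hd, ← hm, PySem.Dict.getD_foldl_modify_append, PySem.Dict.getD_empty]
      simp [List.filter_map, Function.comp_def]
    have hitems : d.items
        = (PySem.Set.ofList (xs.map pvCat)).map
            (fun k => (k, xs.filter (fun it => pvCat it == k))) := by
      rw [PySem.Dict.items_eq_map_keys d hnodup [], hkeys]
      exact List.map_congr_left (fun k _ => by rw [hgetD k])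
    have hsorted : PySem.List.sorted d.items (fun p => p.1) false
        = (PySem.List.sorted (PySem.Set.ofList (xs.map pvCat)) (fun c => c) false).map
            (fun k => (k, xs.filter (fun it => pvCat it == k))) := by
      apply PySem.List.sorted_eq_of_perm_of_pairwise_lt
      · rw [hitems]
        exact (PySem.List.sorted_perm _ _ _).map _
      · rw [List.pairwise_map]
        exact PySem.List.sorted_ofList_pairwise_lt (xs.map pvCat)
    show List.foldl (fun rows p => rows ++ [pvRowA p.1 p.2]) []
        (PySem.List.sorted d.items (fun p => p.1) false) = _
    rw [hsorted, PySem.List.foldl_append_eq_flatMap, List.nil_append,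
      pv_flatMap_singleton (fun p : String × List (List (String × String)) => pvRowA p.1 p.2), List.map_map]
    apply List.map_congr_left
    intro cat hmem
    have hcat : cat ∈ xs.map pvCat := by
      have := (PySem.List.mem_sorted _ _ _ _).mp hmem
      exact (PySem.Set.mem_ofList _ _).mp this
    have hne : xs.filter (fun it => pvCat it == cat) ≠ [] := by
      obtain ⟨it, hit, hc⟩ := List.mem_map.mp hcat
      intro hemp
      have : it ∈ xs.filter (fun it => pvCat it == cat) :=
        List.mem_filter.mpr ⟨hit, by simp [hc]⟩
      simp [hemp] at this
    exact pv_row_eq xs cat hne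

-- ===== VERDICT (by name: the statement is the Claim_ definition above) =====
theorem build_iq_test_scripts_table_py_spec : Claim_equal_build_iq_test_scripts_table_py := by
  intro xs _
  unfold Spec_build_iq_test_scripts_table_py
  exact pv_main xs
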